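-- pv_equiv track=rewrite | github.com/liusanshi/learn | python/求n个数中指定字符的个数.py | nSm
-- ===== SOURCE A (Python) =====
-- def nSm(n, m):
-- 	"""
-- 	获取 0 的个数：比如 nSm(5,3) 是获取 1-5000 的0的个数
-- 	"""
-- 	if m <= 0: return 0
-- 	i = 2
-- 	count = 1
-- 	if m > 1:
-- 		while i <= m:
-- 			count += 9 * (i - 1) * (10 ** (i - 2)) + 1
-- 			i += 1
-- 	return count + (n - 1)*m*(10**(m-1))
-- ===== SOURCE B (Python) =====
-- def nSm(n, m):
--     # Closed form of A's accumulation loop: sum_{j=1}^{m-1} j*10^(j-1) = (1+(9k-1)*10^k)//81 with k=m-1.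
--     if m <= 0:
--         return 0
--     k = m - 1
--     s = (1 + (9 * k - 1) * 10 ** k) // 81
--     return 1 + 9 * s + k + (n - 1) * m * 10 ** k
-- ===== Notes on version B (the rewrite author's own statement) =====
-- stated objective: faster
-- what changed: Replaces A's while-loop accumulation over i=2..m with a closed-form formula using sum_{j=1}^{m-1} j*10^(j-1) = (1+(9(m-1)-1)*10^(m-1))//81.
import Mathlib
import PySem

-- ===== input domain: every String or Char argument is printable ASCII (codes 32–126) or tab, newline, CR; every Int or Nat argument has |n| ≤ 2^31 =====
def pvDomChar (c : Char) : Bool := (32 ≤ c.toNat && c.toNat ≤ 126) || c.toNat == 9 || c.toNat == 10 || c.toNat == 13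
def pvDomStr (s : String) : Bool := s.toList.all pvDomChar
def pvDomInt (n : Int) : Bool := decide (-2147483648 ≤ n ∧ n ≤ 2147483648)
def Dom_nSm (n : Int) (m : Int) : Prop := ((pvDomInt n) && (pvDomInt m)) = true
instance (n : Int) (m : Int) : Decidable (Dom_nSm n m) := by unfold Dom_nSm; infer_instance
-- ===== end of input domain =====

-- B replaces A's accumulation loop with the closed form of the series; proved equal for all inputs.
-- ===== PORT A =====
-- the while loop of A: while i <= m: count += 9*(i-1)*10**(i-2) + 1; i += 1
def nSmLoop (m : Int) (i : Int) (count : Int) : Int :=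
  if i ≤ m then
    nSmLoop m (i + 1) (count + 9 * (i - 1) * (10 ^ (i - 2).toNat) + 1)
  else count
termination_by (m + 1 - i).toNat
decreasing_by
  omega

def nSm (n : Int) (m : Int) : Int :=
  if m ≤ 0 then 0
  else
    let count : Int := 1
    let count := if 1 < m then nSmLoop m 2 count else count
    count + (n - 1) * m * (10 ^ (m - 1).toNat)

-- ===== PORT B =====
def nSm_alt (n : Int) (m : Int) : Int :=
  if m ≤ 0 then 0
  else
    let k := m - 1
    let s := PySem.Int.floordiv (1 + (9 * k - 1) * 10 ^ k.toNat) 81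
    1 + 9 * s + k + (n - 1) * m * 10 ^ k.toNat

-- ===== PRECONDITION & SPEC =====
def Spec_nSm (n : Int) (m : Int) (out : Int) : Prop := out = nSm_alt n m
instance (n : Int) (m : Int) (out : Int) : Decidable (Spec_nSm n m out) := by unfold Spec_nSm; infer_instance

-- ===== CLAIM (what is proved, stated in full; the proofs are below) =====
def Claim_equal_nSm : Prop := ∀ (n : Int) (m : Int), Dom_nSm n m → Spec_nSm n m (nSm n m)

-- ===== LEMMAS AND PROOFS =====

-- ===== VERDICT (by name: the statement is the Claim_ definition above) =====
-- the partial sums of A's loop series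
def nSmSum (k : Nat) : Int := ∑ j ∈ Finset.range k, ((j : Int) + 1) * 10 ^ j

lemma nSmSum_mul (k : Nat) : 81 * nSmSum k = 1 + (9 * (k : Int) - 1) * 10 ^ k := by
  induction k with
  | zero => simp [nSmSum]
  | succ k ih =>
    simp only [nSmSum, Finset.sum_range_succ] at *
    push_cast
    ring_nf
    ring_nf at ih
    linarith [ih]

lemma nSmLoop_eq (k : Nat) : ∀ (i c : Int), 2 ≤ i →
    nSmLoop (i + k - 1) i c
      = c + 9 * (∑ j ∈ Finset.range k, ((i - 1 + (j : Int)) * 10 ^ ((i - 2).toNat + j))) + k := by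
  induction k with
  | zero =>
    intro i c hi
    rw [nSmLoop, if_neg (by omega)]
    simp
  | succ k ih =>
    intro i c hi
    rw [nSmLoop]
    have hle : i ≤ i + (k : Int) + 1 - 1 := by omega
    have harg : i + ((k : Nat) + 1 : Nat) - 1 = (i + 1) + (k : Int) - 1 := by push_cast; ring
    rw [harg, if_pos (by omega)]
    rw [ih (i + 1) _ (by omega)]
    rw [Finset.sum_range_succ']
    have he : (i + 1 - 2).toNat = (i - 2).toNat + 1 := by omega
    have hterm : ∀ j ∈ Finset.range k,
        (i + 1 - 1 + (j : Int)) * 10 ^ ((i + 1 - 2).toNat + j)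
          = (i - 1 + ((j + 1 : Nat) : Int)) * 10 ^ ((i - 2).toNat + (j + 1)) := by
      intro j hj
      rw [he]
      push_cast
      ring_nf
    rw [Finset.sum_congr rfl hterm]
    push_cast
    ring

lemma nSmLoop_closed (k : Nat) (c : Int) :
    nSmLoop ((k : Int) + 1) 2 c = c + 9 * nSmSum k + k := by
  have h := nSmLoop_eq k 2 c (by norm_num)
  have harg : (2 : Int) + k - 1 = (k : Int) + 1 := by ring
  rw [harg] at h
  rw [h, nSmSum]
  have hs : (∑ j ∈ Finset.range k, ((2 - 1 + (j : Int)) * 10 ^ (((2 : Int) - 2).toNat + j)))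
      = ∑ j ∈ Finset.range k, ((j : Int) + 1) * 10 ^ j := by
    apply Finset.sum_congr rfl
    intro j hj
    norm_num
    ring
  rw [hs]

-- ===== VERDICT (by name: the statement is the Claim_ definition above) =====
theorem nSm_spec : Claim_equal_nSm := by
  intro n m _
  unfold Spec_nSm nSm nSm_alt
  by_cases hm : m ≤ 0
  · simp [hm]
  · simp only [if_neg hm]
    replace hm : 0 < m := by omega
    set k : Nat := (m - 1).toNat with hk
    have hmk : m = (k : Int) + 1 := by omega
    have hfd : PySem.Int.floordiv (1 + (9 * (m - 1) - 1) * 10 ^ (m - 1).toNat) 81 = nSmSum k := by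
      have : (1 + (9 * (m - 1) - 1) * 10 ^ (m - 1).toNat) = 81 * nSmSum k := by
        have h1 : m - 1 = (k : Int) := by omega
        have h2 : (m - 1).toNat = k := by omega
        rw [nSmSum_mul k, h1]
        norm_num
      rw [this, PySem.Int.floordiv]
      exact Int.mul_fdiv_cancel_left _ (by norm_num)
    by_cases h1 : 1 < m
    · simp only [if_pos h1]
      have hloop : nSmLoop m 2 1 = 1 + 9 * nSmSum k + k := by
        rw [hmk]; exact nSmLoop_closed k 1
      rw [hloop, hfd, hmk]
      ring
    · have hm1 : m = 1 := by omega
      subst hm1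
      have hk0 : k = 0 := by omega
      norm_num [hk0, PySem.Int.floordiv, Int.fdiv]
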